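-- pv_equiv track=rewrite | github.com/baeksangha/python_sw | 5203_베이비진게임/source.py | is_triple
-- ===== SOURCE A (Python) =====
-- def is_triple(arr):
--     d = {}
--     for n in arr:
--         if n in d:
--             d[n] += 1
--             if d[n] == 3:
--                 return 1
--         else:
--             d[n] = 1
--     return 0
-- ===== SOURCE B (Python) =====
-- def is_triple(arr):
--     s = sorted(arr)
--     return 1 if any(x == z for x, z in zip(s, s[2:])) else 0
-- ===== Notes on version B (the rewrite author's own statement) =====
-- stated objective: alternative
-- what changed: Replaces A's hash-count loop with early exit by a sort-then-scan: sort the list and report 1 iff some element equals the element two positions later (a value occurs three times iff the sorted list has s[i] == s[i+2]).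
import Mathlib
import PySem

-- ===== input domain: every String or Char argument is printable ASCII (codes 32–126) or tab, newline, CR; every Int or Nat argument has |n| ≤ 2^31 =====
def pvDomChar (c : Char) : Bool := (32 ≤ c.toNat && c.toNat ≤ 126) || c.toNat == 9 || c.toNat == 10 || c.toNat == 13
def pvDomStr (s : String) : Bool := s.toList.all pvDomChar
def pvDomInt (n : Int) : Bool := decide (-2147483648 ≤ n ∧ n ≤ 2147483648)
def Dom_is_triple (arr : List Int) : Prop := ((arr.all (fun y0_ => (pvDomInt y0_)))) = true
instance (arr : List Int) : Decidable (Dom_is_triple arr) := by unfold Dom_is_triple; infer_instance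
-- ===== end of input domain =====

-- B sorts the list and checks s[i] == s[i+2] for some i (a value occurs three times iff that holds); alternative algorithm, not claimed faster.

-- ===== PORT A =====
-- the for-loop of A: dict d, early return 1 when a count reaches 3
def isTripleGo (d : PySem.Dict Int Int) : List Int → Int
  | [] => 0
  | n :: rest =>
    if d.contains n then
      let d' := d.modify n 0 (· + 1)
      if d'.getD n 0 = 3 then 1 else isTripleGo d' rest
    else
      isTripleGo (d.insert n 1) rest

def is_triple (arr : List Int) : Int := isTripleGo PySem.Dict.empty arr

-- ===== PORT B =====
def is_triple_alt (arr : List Int) : Int :=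
  let s := PySem.List.sorted arr (fun x => x) false
  if (s.zip (PySem.List.slice s (some 2) none)).any (fun p => p.1 == p.2) then 1 else 0

-- ===== PRECONDITION & SPEC =====
def Spec_is_triple (arr : List Int) (out : Int) : Prop := out = is_triple_alt arr
instance (arr : List Int) (out : Int) : Decidable (Spec_is_triple arr out) := by unfold Spec_is_triple; infer_instance

-- ===== CLAIM =====
def Claim_equal_is_triple : Prop := ∀ (arr : List Int), Dom_is_triple arr → Spec_is_triple arr (is_triple arr)

-- ===== LEMMAS AND PROOFS =====

-- the invariant of A's loop: d is the count table of the processed prefix, all of whose counts are < 3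
lemma goA (l : List Int) : ∀ (pre : List Int) (d : PySem.Dict Int Int),
    (∀ v, d.getD v 0 = (pre.count v : Int)) →
    (∀ v, d.contains v = decide (v ∈ pre)) →
    (∀ v, pre.count v < 3) →
    isTripleGo d l = if (pre ++ l).any (fun n => decide (3 ≤ ((pre ++ l).count n : Int))) then 1 else 0 := by
  induction l with
  | nil =>
    intro pre d hget hcon hlt
    simp only [isTripleGo, List.append_nil]
    have : pre.any (fun n => decide (3 ≤ ((pre.count n : Int)))) = false := by
      simp only [List.any_eq_false, decide_eq_true_eq]
      intro v _
      have := hlt v; omega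
    rw [this]; simp
  | cons n rest ih =>
    intro pre d hget hcon hlt
    simp only [isTripleGo, hcon n]
    by_cases hn : n ∈ pre
    · simp only [hn, decide_true, if_true]
      have hdn : (d.modify n 0 (· + 1)).getD n 0 = (pre.count n : Int) + 1 := by
        rw [PySem.Dict.getD_modify_self, hget]
      by_cases h3 : (pre.count n : Int) + 1 = 3
      · rw [hdn, if_pos h3]
        have hmem : n ∈ pre ++ n :: rest := by simp
        have hcnt : 3 ≤ ((pre ++ n :: rest).count n : Int) := by
          rw [List.count_append, List.count_cons_self]
          push_cast; omega
        have : (pre ++ n :: rest).any (fun m => decide (3 ≤ ((pre ++ n :: rest).count m : Int))) = true := by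
          simp only [List.any_eq_true]
          exact ⟨n, hmem, by simpa using hcnt⟩
        rw [this]; rfl
      · rw [hdn, if_neg h3]
        have := ih (pre ++ [n]) (d.modify n 0 (· + 1))
          (by
            intro v
            rw [PySem.Dict.getD_modify, List.count_append]
            by_cases hv : v = n
            · subst hv; simp [hget]
            · have h0 : List.count v [n] = 0 := by
                simp [Ne.symm hv]
              rw [if_neg hv, hget, h0]; push_cast; ring)
          (by
            intro v
            rw [PySem.Dict.contains_modify, hcon]
            by_cases hv : v = n <;> simp [hv, hn])
          (by
            intro v
            rw [List.count_append]
            by_cases hv : v = n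
            · subst hv; rw [List.count_singleton_self]
              have := hlt v; omega
            · have h0 : List.count v [n] = 0 := by simp [Ne.symm hv]
              rw [h0]; have := hlt v; omega)
        simpa using this
    · simp only [hn, decide_false]
      have hn0 : pre.count n = 0 := List.count_eq_zero.mpr hn
      have := ih (pre ++ [n]) (d.insert n 1)
        (by
          intro v
          rw [PySem.Dict.getD_insert, List.count_append]
          by_cases hv : v = n
          · subst hv; simp [hn0]
          · have h0 : List.count v [n] = 0 := by
              simp [Ne.symm hv]
            rw [if_neg hv, hget, h0]; push_cast; ring)
        (by
          intro v
          rw [PySem.Dict.contains_insert, hcon]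
          by_cases hv : v = n <;> simp [hv])
        (by
          intro v
          rw [List.count_append]
          by_cases hv : v = n
          · subst hv; rw [List.count_singleton_self]; omega
          · have h0 : List.count v [n] = 0 := by simp [Ne.symm hv]
            rw [h0]; have := hlt v; omega)
      simpa using this

-- on a weakly increasing list, the s[i]=s[i+2] scan detects exactly "some element occurs ≥ 3 times"
lemma adj3_iff (s : List Int) (hp : s.Pairwise (· ≤ ·)) :
    ((s.zip (s.drop 2)).any (fun p => p.1 == p.2) = true ↔ ∃ n, 3 ≤ s.count n) := by
  induction s with
  | nil => simp
  | cons a t ih =>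
    match t with
    | [] =>
      simp only [List.drop, List.zip_nil_right, List.any_nil, Bool.false_eq_true, false_iff]
      rintro ⟨n, hn⟩
      have := List.count_le_length (l := [a]) (a := n)
      simp at this; omega
    | [b] =>
      simp only [List.drop, List.zip_nil_right, List.any_nil, Bool.false_eq_true, false_iff]
      rintro ⟨n, hn⟩
      have := List.count_le_length (l := [a, b]) (a := n)
      simp at this; omega
    | b :: c :: r =>
      have hab : a ≤ b := (List.pairwise_cons.mp hp).1 b (by simp)
      have hac : a ≤ c := (List.pairwise_cons.mp hp).1 c (by simp)
      have hpt : (b :: c :: r).Pairwise (· ≤ ·) := (List.pairwise_cons.mp hp).2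
      have hbc : b ≤ c := (List.pairwise_cons.mp hpt).1 c (by simp)
      have hcr : ∀ x ∈ r, c ≤ x := ((List.pairwise_cons.mp (List.pairwise_cons.mp hpt).2).1)
      have hzip : ((a :: b :: c :: r).zip ((a :: b :: c :: r).drop 2))
          = (a, c) :: ((b :: c :: r).zip ((b :: c :: r).drop 2)) := by
        simp [List.zip]
      rw [hzip, List.any_cons, Bool.or_eq_true, ih hpt]
      constructor
      · rintro (h | ⟨n, hn⟩)
        · -- a = c, hence a = b = c and a occurs ≥ 3 times
          have hacq : a = c := by simpa using h
          have habq : a = b := le_antisymm hab (hacq ▸ hbc)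
          refine ⟨a, ?_⟩
          rw [List.count_cons_self, ← habq, List.count_cons_self, ← hacq, List.count_cons_self]
          omega
        · exact ⟨n, le_trans hn (List.count_le_count_cons ..)⟩
      · rintro ⟨n, hn⟩
        by_cases hna : n = a
        · subst hna
          by_cases hnc : n = c
          · exact Or.inl (by simpa using hnc)
          · -- n = a < c, so n does not occur in c :: r; its count is at most 2, contradiction
            exfalso
            have hlt : n < c := lt_of_le_of_ne hac hnc
            have h0 : (c :: r).count n = 0 := by
              rw [List.count_eq_zero]
              intro hmem
              rcases List.mem_cons.mp hmem with h | h
              · exact hnc h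
              · exact absurd (hcr n h) (not_le.mpr hlt)
            have h1 : (b :: c :: r).count n ≤ 1 := by
              rw [List.count_cons, h0]
              split <;> omega
            rw [List.count_cons_self] at hn
            omega
        · refine Or.inr ⟨n, ?_⟩
          rw [List.count_cons] at hn
          simp only [beq_iff_eq] at hn
          rw [if_neg (fun h => hna h.symm), add_zero] at hn
          exact hn

-- ===== VERDICT =====
theorem is_triple_spec : Claim_equal_is_triple := by
  intro arr _
  unfold Spec_is_triple
  simp only [is_triple_alt]
  have hA := goA arr [] PySem.Dict.empty
    (by intro v; simp [PySem.Dict.getD_empty])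
    (by intro v; simp [PySem.Dict.contains_empty])
    (by intro v; simp)
  simp only [List.nil_append] at hA
  rw [is_triple, hA]
  rw [show PySem.List.slice (PySem.List.sorted arr (fun x => x) false) (some 2) none
      = (PySem.List.sorted arr (fun x => x) false).drop 2 by simp [pysem]]
  set s := PySem.List.sorted arr (fun x => x) false with hs
  have hperm : s.Perm arr := PySem.List.sorted_perm ..
  have hp : s.Pairwise (· ≤ ·) := by
    have := PySem.List.sorted_pairwise (xs := arr) (key := fun x => x)
    simpa using this
  have hiff : (arr.any (fun n => decide (3 ≤ ((arr.count n : Int)))) = true)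
      ↔ ((s.zip (s.drop 2)).any (fun p => p.1 == p.2) = true) := by
    rw [adj3_iff s hp]
    simp only [List.any_eq_true, decide_eq_true_eq]
    constructor
    · rintro ⟨n, _, hn⟩
      refine ⟨n, ?_⟩
      rw [hperm.count_eq]; omega
    · rintro ⟨n, hn⟩
      rw [hperm.count_eq] at hn
      refine ⟨n, ?_, by exact_mod_cast hn⟩
      exact List.count_pos_iff.mp (by omega)
  exact if_congr hiff rfl rfl
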